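-- pv_equiv track=rewrite | github.com/francesco-camaione/FindTrain-Trenitalia | utils/utils.py | train_name
-- ===== SOURCE A (Python) =====
-- def train_name(trainlist: list):
--     names = [treni_["trainidentifier"] for treni_ in trainlist]
--     train_names = ""
--     if len(names) >= 3:
--         train_names += f"{names[0]}; {names[1]}; {names[2]}"
--     if len(names) == 2:
--         train_names += f"{names[0]}; {names[1]}"
--     if len(names) == 1:
--         train_names += f"{names[0]}"
--     return train_names
-- ===== SOURCE B (Python) =====
-- def train_name(trainlist: list):
--     names = [treni_["trainidentifier"] for treni_ in trainlist]
--     return "; ".join(str(n) for n in names[:3])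
-- ===== Notes on version B (the rewrite author's own statement) =====
-- stated objective: idiomatic
-- what changed: Replaces the three length-based if-branches that hand-concatenate f-strings with a single slice-and-join: '; '.join of names[:3], which handles lengths 0/1/2/>=3 uniformly.
import Mathlib
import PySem

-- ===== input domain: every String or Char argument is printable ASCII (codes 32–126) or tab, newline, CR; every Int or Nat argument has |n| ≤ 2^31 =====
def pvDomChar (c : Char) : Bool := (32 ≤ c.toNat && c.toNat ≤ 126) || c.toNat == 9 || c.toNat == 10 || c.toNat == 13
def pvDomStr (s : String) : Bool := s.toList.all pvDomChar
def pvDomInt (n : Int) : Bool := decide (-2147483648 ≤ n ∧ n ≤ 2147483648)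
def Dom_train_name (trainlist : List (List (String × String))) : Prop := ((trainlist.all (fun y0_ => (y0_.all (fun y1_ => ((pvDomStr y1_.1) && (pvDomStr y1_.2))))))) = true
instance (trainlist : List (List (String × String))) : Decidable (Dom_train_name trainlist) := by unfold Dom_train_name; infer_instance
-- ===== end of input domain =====

-- B joins names[:3] with "; " instead of A's three length-based append branches; return values proved equal.

-- dict lookup d["trainidentifier"]: first match in the association list (exact for Python dicts,
-- whose keys are unique); under Pre_ the key is always present, so the "" default is never used.
def pvLookup (d : List (String × String)) (k : String) : String :=
  match d with
  | [] => ""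
  | (k', v) :: rest => if k' == k then v else pvLookup rest k

-- ===== PORT A =====
def train_name (trainlist : List (List (String × String))) : String :=
  let names := trainlist.map (fun d => pvLookup d "trainidentifier")
  let t : String := ""
  let t := if names.length ≥ 3 then
      t ++ PySem.List.pyGetD names 0 "" ++ "; " ++ PySem.List.pyGetD names 1 "" ++ "; " ++ PySem.List.pyGetD names 2 ""
    else t
  let t := if names.length = 2 then
      t ++ PySem.List.pyGetD names 0 "" ++ "; " ++ PySem.List.pyGetD names 1 ""
    else t
  let t := if names.length = 1 then t ++ PySem.List.pyGetD names 0 "" else t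
  t

-- ===== PORT B =====
def train_name_alt (trainlist : List (List (String × String))) : String :=
  let names := trainlist.map (fun d => pvLookup d "trainidentifier")
  PySem.Str.join "; " (PySem.List.slice names none (some 3))

-- ===== PRECONDITION & SPEC =====
-- Pre_ excludes exactly the inputs where some dict lacks the key "trainidentifier": there Python A raises KeyError.
def Pre_train_name (trainlist : List (List (String × String))) : Prop :=
  ∀ d ∈ trainlist, "trainidentifier" ∈ d.map Prod.fst
instance (trainlist : List (List (String × String))) : Decidable (Pre_train_name trainlist) := by unfold Pre_train_name; infer_instance

def pvWitness_train_name : (List (List (String × String))) :=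
  [[("trainidentifier", "FR 9629")], [("trainidentifier", "IC 581")]]

def Spec_train_name (trainlist : List (List (String × String))) (out : String) : Prop := out = train_name_alt trainlist
instance (trainlist : List (List (String × String))) (out : String) : Decidable (Spec_train_name trainlist out) := by unfold Spec_train_name; infer_instance

-- ===== CLAIM (what is proved, stated in full; the proofs are below) =====
def Claim_equal_train_name : Prop := ∀ (trainlist : List (List (String × String))), Dom_train_name trainlist → Pre_train_name trainlist → Spec_train_name trainlist (train_name trainlist)

-- ===== LEMMAS AND PROOFS =====
theorem join2 (a b : String) : PySem.Str.join "; " [a, b] = a ++ "; " ++ b := by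
  simp [PySem.Str.join, PySem.Chars.join_cons_cons, PySem.Chars.join_singleton]
  apply String.toList_injective
  simp [String.toList_ofList]

theorem join3 (a b c : String) : PySem.Str.join "; " [a, b, c] = a ++ "; " ++ b ++ "; " ++ c := by
  simp [PySem.Str.join, PySem.Chars.join_cons_cons, PySem.Chars.join_singleton]
  apply String.toList_injective
  simp [String.toList_ofList]

theorem join1 (a : String) : PySem.Str.join "; " [a] = a := by
  simp [PySem.Str.join, PySem.Chars.join_singleton]

theorem join0 : PySem.Str.join "; " ([] : List String) = "" := by
  simp [PySem.Str.join, PySem.Chars.join_nil]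

-- ===== VERDICT (by name: the statement is the Claim_ definition above) =====
theorem train_name_spec : Claim_equal_train_name := by
  intro tl _ _
  unfold Spec_train_name train_name train_name_alt
  have hsl : ∀ (xs : List String), PySem.List.slice xs none (some 3) = xs.take 3 := by
    intro xs
    simpa using PySem.List.slice_to xs (b := 3) (by omega)
  match tl with
  | [] => simp [hsl, join0]
  | [d] => simp [hsl, join1, PySem.List.pyGetD]
  | [d1, d2] => simp [hsl, join2, PySem.List.pyGetD, PySem.List.pyGet?, PySem.List.pyIdx?]
  | d1 :: d2 :: d3 :: rest =>
      have h0 : (0:Int) ≤ (rest.length:Int) + 1 + 1 := by omega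
      have h1 : (0:Int) ≤ (rest.length:Int) + 1 := by omega
      have h2 : (2:Int) ≤ (rest.length:Int) + 1 + 1 := by omega
      simp [hsl, join3, PySem.List.pyGetD, PySem.List.pyGet?, PySem.List.pyIdx?, h0, h1, h2]
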